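-- pv_equiv track=rewrite | github.com/Lzobz/Final_Project_4320 | logan_methods.py | salesTotal
-- ===== SOURCE A (Python) =====
-- def salesTotal(seats):
--     cost_matrix = [100, 75, 50, 100]
--     total = 0
--
--     for x in seats:
--         count = 0
--         for y in x:
--             if y == 'X':
--                 total += cost_matrix[count]
--             count+=1
--
--     return total
-- ===== SOURCE B (Python) =====
-- def salesTotal(seats):
--     cost_matrix = [100, 75, 50, 100]
--     occupied = [col for row in seats for col, ch in enumerate(row) if ch == 'X']
--     counts = {}
--     for col in occupied:
--         counts[col] = counts.get(col, 0) + 1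
--     return sum(cost_matrix[col] * n for col, n in counts.items())
-- ===== Notes on version B (the rewrite author's own statement) =====
-- stated objective: alternative
-- what changed: B first collects all occupied column indices, aggregates them into a per-column count table (dict), and prices the table in one final sum, instead of A's cell-by-cell pricing with a manual position counter inside nested loops.
import Mathlib
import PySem

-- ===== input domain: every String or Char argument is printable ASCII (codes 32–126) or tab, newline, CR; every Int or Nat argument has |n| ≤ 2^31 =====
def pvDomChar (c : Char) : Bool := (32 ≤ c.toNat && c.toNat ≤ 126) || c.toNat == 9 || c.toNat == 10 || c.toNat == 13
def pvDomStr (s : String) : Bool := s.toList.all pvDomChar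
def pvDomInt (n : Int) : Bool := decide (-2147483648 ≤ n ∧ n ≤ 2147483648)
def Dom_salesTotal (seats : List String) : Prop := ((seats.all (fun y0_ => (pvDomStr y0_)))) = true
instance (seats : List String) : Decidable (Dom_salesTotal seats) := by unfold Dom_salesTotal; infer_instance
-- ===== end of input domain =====

-- B aggregates occupied seats into a per-column count table before pricing, instead of A's
-- cell-by-cell pricing with a manual position counter (objective: alternative decomposition).

-- ===== PORT A =====
-- literal port of A: nested loops, state (total, count); cost_matrix[count] is pyGet?
-- (none = IndexError, excluded by Pre_; .getD 0 is never reached inside Pre_)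
def salesTotal (seats : List String) : Int :=
  let cost_matrix : List Int := [100, 75, 50, 100]
  seats.foldl
    (fun total x =>
      (x.toList.foldl
        (fun (p : Int × Int) y =>
          (if y = 'X' then p.1 + (PySem.List.pyGet? cost_matrix p.2).getD 0 else p.1, p.2 + 1))
        (total, 0)).1)
    0

-- ===== PORT B =====
-- literal port of Source B: list of occupied column indices, count dict, priced sum
def salesTotal_alt (seats : List String) : Int :=
  let cost_matrix : List Int := [100, 75, 50, 100]
  let occupied : List Int :=
    seats.flatMap (fun row =>
      (PySem.List.enumerate row.toList 0).filterMap
        (fun p => if p.2 = 'X' then some p.1 else none))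
  let counts :=
    occupied.foldl (fun d x => d.insert x (d.getD x 0 + 1)) (PySem.Dict.empty (κ := Int) (ν := Int))
  counts.items.foldl (fun acc p => acc + (PySem.List.pyGet? cost_matrix p.1).getD 0 * p.2) 0

-- ===== PRECONDITION & SPEC =====
-- Pre_ excludes exactly the inputs where Python A raises IndexError: a row with an
-- occupied seat 'X' at column index ≥ 4 (beyond cost_matrix); B raises there too.
def Pre_salesTotal (seats : List String) : Prop :=
  ∀ s ∈ seats, ∀ p ∈ s.toList.zipIdx, p.1 = 'X' → p.2 < 4
instance (seats : List String) : Decidable (Pre_salesTotal seats) := by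
  unfold Pre_salesTotal; infer_instance
def pvWitness_salesTotal : List String := ["X.XO", ".X"]

def Spec_salesTotal (seats : List String) (out : Int) : Prop := out = salesTotal_alt seats
instance (seats : List String) (out : Int) : Decidable (Spec_salesTotal seats out) := by unfold Spec_salesTotal; infer_instance

-- ===== CLAIM (what is proved, stated in full; the proofs are below) =====
def Claim_equal_salesTotal : Prop := ∀ (seats : List String), Dom_salesTotal seats → Pre_salesTotal seats → Spec_salesTotal seats (salesTotal seats)

-- ===== LEMMAS AND PROOFS =====

-- price of a column (proof-only abbreviation)
def pvPrice (c : Int) : Int :=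
  (PySem.List.pyGet? ([100, 75, 50, 100] : List Int) c).getD 0

-- occupied columns of one row, starting enumeration at n
def pvOcc (l : List Char) (n : Int) : List Int :=
  (PySem.List.enumerate l n).filterMap (fun p => if p.2 = 'X' then some p.1 else none)

-- A's inner loop sums the prices of the row's occupied columns
theorem pvInnerA (l : List Char) (t n : Int) :
    (l.foldl
      (fun (p : Int × Int) y =>
        (if y = 'X' then p.1 + (PySem.List.pyGet? ([100, 75, 50, 100] : List Int) p.2).getD 0
         else p.1, p.2 + 1))
      (t, n)).1 = t + ((pvOcc l n).map pvPrice).sum := by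
  induction l generalizing t n with
  | nil => simp [pvOcc, PySem.List.enumerate_nil]
  | cons y ys ih =>
    simp only [List.foldl_cons, pvOcc, PySem.List.enumerate_cons, List.filterMap_cons]
    by_cases hy : y = 'X' <;>
      simp [hy, ih, pvOcc, pvPrice, add_assoc]

-- sum of g over a Nodup list, split at a member x (filter predicate matches Set.discard)
theorem pvSumSplit (g : Int → Int) (s : List Int) (x : Int) (hnd : s.Nodup) (hx : x ∈ s) :
    (s.map g).sum = g x + ((s.filter (fun y => !(y == x))).map g).sum := by
  induction s with
  | nil => cases hx
  | cons a s ih =>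
    have hnd' := List.nodup_cons.mp hnd
    by_cases hax : a = x
    · subst hax
      have hfil : s.filter (fun y => !(y == a)) = s := by
        apply List.filter_eq_self.mpr
        intro y hy
        have : y ≠ a := by rintro rfl; exact hnd'.1 hy
        simp [this]
      simp [hfil]
    · have hxs : x ∈ s := by
        rcases List.mem_cons.mp hx with h | h
        · exact absurd h.symm hax
        · exact h
      have := ih hnd'.2 hxs
      simp only [List.filter_cons, List.map_cons, List.sum_cons]
      have hba : (a == x) = false := beq_eq_false_iff_ne.mpr hax
      simp only [hba, Bool.not_false, if_true, List.map_cons, List.sum_cons]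
      omega

-- grouping: sum over set(xs) of g k * count k = sum over xs of g
theorem pvGroup (g : Int → Int) (xs : List Int) :
    ((PySem.Set.ofList xs).map (fun k => g k * (xs.count k : Int))).sum
      = (xs.map g).sum := by
  induction xs with
  | nil => simp [PySem.Set.ofList_nil]
  | cons x xs ih =>
    rw [PySem.Set.ofList_cons]
    have hdis : PySem.Set.discard (PySem.Set.ofList xs) x
        = (PySem.Set.ofList xs).filter (fun y => !(y == x)) := by
      simp [PySem.Set.discard]
    by_cases hx : x ∈ xs
    · have hmem : x ∈ PySem.Set.ofList xs := (PySem.Set.mem_ofList _ _).mpr hx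
      have hnd := PySem.Set.nodup_ofList (xs := xs)
      have hsplit := pvSumSplit (fun k => g k * (xs.count k : Int)) (PySem.Set.ofList xs) x hnd hmem
      simp only [List.map_cons, List.sum_cons, hdis]
      have hmapeq :
          (((PySem.Set.ofList xs).filter (fun y => !(y == x))).map
              (fun k => g k * (((x :: xs).count k : Int))))
            = (((PySem.Set.ofList xs).filter (fun y => !(y == x))).map
              (fun k => g k * ((xs.count k : Int)))) := by
        apply List.map_congr_left
        intro k hk
        have hkx : k ≠ x := by
          have := List.of_mem_filter hk
          simpa using this
        simp [List.count_cons]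
        exact Or.inl (fun h => hkx h.symm)
      rw [hmapeq]
      rw [ih] at hsplit
      simp only at hsplit
      simp only [List.count_cons_self]
      push_cast
      linarith [hsplit]
    · have hcnt0 : xs.count x = 0 := List.count_eq_zero.mpr hx
      have hdis2 : PySem.Set.discard (PySem.Set.ofList xs) x = PySem.Set.ofList xs := by
        rw [hdis]
        apply List.filter_eq_self.mpr
        intro y hy
        have : y ≠ x := by
          rintro rfl; exact hx ((PySem.Set.mem_ofList _ _).mp hy)
        simp [this]
      simp only [List.map_cons, List.sum_cons, hdis2]
      have hmapeq : ((PySem.Set.ofList xs).map (fun k => g k * (((x :: xs).count k : Int))))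
          = ((PySem.Set.ofList xs).map (fun k => g k * ((xs.count k : Int)))) := by
        apply List.map_congr_left
        intro k hk
        have hkx : k ≠ x := by
          rintro rfl; exact hx ((PySem.Set.mem_ofList _ _).mp hk)
        simp [List.count_cons]
        exact Or.inl (fun h => hkx h.symm)
      rw [hmapeq, ih]
      simp [List.count_cons_self, hcnt0]

-- the shared closed form: both ports equal the sum of prices over all occupied columns
theorem pvA_closed (seats : List String) :
    salesTotal seats
      = ((seats.flatMap (fun row => pvOcc row.toList 0)).map pvPrice).sum := by
  unfold salesTotal
  induction seats using List.reverseRecOn with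
  | nil => simp
  | append_singleton seats s ih =>
    simp only [List.foldl_append, List.foldl_cons, List.foldl_nil, List.flatMap_append,
      List.flatMap_cons, List.flatMap_nil, List.map_append, List.sum_append, List.append_nil]
    rw [ih, pvInnerA]

theorem pvB_closed (seats : List String) :
    salesTotal_alt seats
      = ((seats.flatMap (fun row => pvOcc row.toList 0)).map pvPrice).sum := by
  unfold salesTotal_alt
  simp only []
  set occ := seats.flatMap (fun row =>
      (PySem.List.enumerate row.toList 0).filterMap
        (fun p => if p.2 = 'X' then some p.1 else none)) with hocc
  have hoccEq : occ = seats.flatMap (fun row => pvOcc row.toList 0) := by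
    simp [hocc, pvOcc]
  rw [PySem.Dict.foldl_insert_getD_add_one_eq_counter, PySem.Dict.items_counter]
  rw [PySem.List.foldl_add]
  rw [List.map_map]
  have hcomp : ((fun p : Int × Int =>
        (PySem.List.pyGet? ([100, 75, 50, 100] : List Int) p.1).getD 0 * p.2) ∘
        fun k => (k, (occ.count k : Int)))
      = fun k => pvPrice k * (occ.count k : Int) := by
    funext k; simp [pvPrice]
  rw [hcomp, pvGroup pvPrice occ, hoccEq, zero_add]

-- ===== VERDICT (by name: the statement is the Claim_ definition above) =====
theorem salesTotal_spec : Claim_equal_salesTotal := by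
  intro seats _ _
  unfold Spec_salesTotal
  rw [pvA_closed, pvB_closed]
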